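-- pv_equiv track=rewrite | github.com/thealper2/codewars-solutions | 7-kyu/hex_hash_sum.py | hex_hash
-- ===== SOURCE A (Python) =====
-- def hex_hash(code):
--     result = 0
--     for c in code:
--         hex_c = hex(ord(c))[2:]
--         for d in hex_c:
--             if d.isdigit():
--                 result += int(d)
--
--     return result
-- ===== SOURCE B (Python) =====
-- def hex_hash(code):
--     total = 0
--     for c in code:
--         n = ord(c)
--         while n:
--             r = n % 16
--             if r < 10:
--                 total += r
--             n //= 16
--     return total
-- ===== Notes on version B (the rewrite author's own statement) =====
-- stated objective: faster
-- what changed: B extracts base-16 digits arithmetically (n % 16 / n //= 16 while-loop, adding remainders below 10) instead of formatting each codepoint with hex() and parsing the digit characters of the resulting string.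
import Mathlib
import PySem

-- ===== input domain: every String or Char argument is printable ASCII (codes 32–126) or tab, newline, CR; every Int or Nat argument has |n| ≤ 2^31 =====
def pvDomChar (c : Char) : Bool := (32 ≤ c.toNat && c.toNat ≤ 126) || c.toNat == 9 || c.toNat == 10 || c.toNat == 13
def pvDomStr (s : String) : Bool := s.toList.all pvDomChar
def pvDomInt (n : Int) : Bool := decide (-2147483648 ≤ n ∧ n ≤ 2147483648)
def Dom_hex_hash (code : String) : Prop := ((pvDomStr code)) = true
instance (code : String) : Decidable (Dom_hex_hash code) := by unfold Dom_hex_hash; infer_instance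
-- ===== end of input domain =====

-- B replaces A's hex()-string formatting and digit-character parsing by arithmetic
-- base-16 digit extraction (n % 16 / n // 16); same result; a timing run measured B faster by a constant factor.

-- ===== PORT A =====
-- digits of n in base 16, most significant first (empty for 0); hex(n)[2:] = map of these (with '0' for n = 0)
def hhHexDigits : Nat → List Nat
  | 0 => []
  | n+1 => hhHexDigits ((n+1) / 16) ++ [(n+1) % 16]
decreasing_by exact Nat.div_lt_self (Nat.succ_pos n) (by omega)

def hhToChar (d : Nat) : Char := if d < 10 then Char.ofNat (48 + d) else Char.ofNat (87 + d)

-- hex(n)[2:] as a list of characters (Python prints '0' for 0)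
def hhHex (n : Nat) : List Char :=
  if n = 0 then ['0'] else (hhHexDigits n).map hhToChar

-- inner loop body: d.isdigit() test, then int(d); int(d) ported as toNat - 48, exact on digit characters
def hhInner (result : Int) (d : Char) : Int :=
  if PySem.Chars.isdigit d then result + ((d.toNat : Int) - 48) else result

def hex_hash (code : String) : Int :=
  code.toList.foldl (fun result c => (hhHex c.toNat).foldl hhInner result) 0

-- ===== PORT B =====
-- the while loop of Source B: peel base-16 digits off n, adding remainders below 10 to total
def hhPeel : Nat → Int → Int
  | 0, total => total
  | n+1, total =>
      hhPeel ((n+1) / 16) (if (n+1) % 16 < 10 then total + ((n+1) % 16 : Int) else total)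
decreasing_by exact Nat.div_lt_self (Nat.succ_pos n) (by omega)

def hex_hash_alt (code : String) : Int :=
  code.toList.foldl (fun total c => hhPeel c.toNat total) 0

-- ===== PRECONDITION & SPEC =====
def Spec_hex_hash (code : String) (out : Int) : Prop := out = hex_hash_alt code
instance (code : String) (out : Int) : Decidable (Spec_hex_hash code out) := by unfold Spec_hex_hash; infer_instance

-- ===== CLAIM (what is proved, stated in full; the proofs are below) =====
def Claim_equal_hex_hash : Prop := ∀ (code : String), Dom_hex_hash code → Spec_hex_hash code (hex_hash code)

-- ===== LEMMAS AND PROOFS =====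

-- value contributed by one base-16 digit
def hhVal (d : Nat) : Int := if d < 10 then (d : Int) else 0

theorem hhHexDigits_lt (n : Nat) : ∀ d ∈ hhHexDigits n, d < 16 := by
  induction n using Nat.strong_induction_on with
  | _ n ih =>
    match n with
    | 0 => simp [hhHexDigits]
    | m+1 =>
      rw [hhHexDigits]
      intro d hd
      rcases List.mem_append.mp hd with h | h
      · exact ih ((m+1)/16) (Nat.div_lt_self (Nat.succ_pos m) (by omega)) d h
      · simp at h; omega

theorem hhInner_toChar (acc : Int) (d : Nat) (hd : d < 16) :
    hhInner acc (hhToChar d) = acc + hhVal d := by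
  interval_cases d <;> simp [hhInner, hhToChar, hhVal] <;> decide

theorem foldl_hhInner_map (l : List Nat) (acc : Int) (h : ∀ d ∈ l, d < 16) :
    (l.map hhToChar).foldl hhInner acc = acc + (l.map hhVal).sum := by
  induction l generalizing acc with
  | nil => simp
  | cons d t ih =>
    simp only [List.foldl_cons, List.map, List.sum_cons]
    rw [hhInner_toChar acc d (h d (by simp))]
    rw [ih _ (fun x hx => h x (by simp [hx]))]
    ring

theorem hhPeel_eq (n : Nat) : ∀ total : Int,
    hhPeel n total = total + ((hhHexDigits n).map hhVal).sum := by
  induction n using Nat.strong_induction_on with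
  | _ n ih =>
    match n with
    | 0 => intro total; simp [hhPeel, hhHexDigits]
    | m+1 =>
      intro total
      rw [hhPeel, hhHexDigits]
      rw [ih ((m+1)/16) (Nat.div_lt_self (Nat.succ_pos m) (by omega))]
      simp only [List.map_append, List.sum_append, List.map, List.sum_cons, List.sum_nil]
      unfold hhVal
      split_ifs <;> push_cast <;> ring

theorem hhHex_foldl (n : Nat) (acc : Int) :
    (hhHex n).foldl hhInner acc = hhPeel n acc := by
  unfold hhHex
  split_ifs with h
  · subst h
    have : hhInner acc '0' = acc := by simp [hhInner]
    simp [hhPeel, this]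
  · rw [foldl_hhInner_map _ _ (hhHexDigits_lt n), hhPeel_eq]

theorem foldl_chars (cs : List Char) (acc : Int) :
    cs.foldl (fun result c => (hhHex c.toNat).foldl hhInner result) acc
      = cs.foldl (fun total c => hhPeel c.toNat total) acc := by
  induction cs generalizing acc with
  | nil => rfl
  | cons c t ih => simp only [List.foldl_cons, hhHex_foldl]

-- ===== VERDICT (by name: the statement is the Claim_ definition above) =====
theorem hex_hash_spec : Claim_equal_hex_hash := by
  intro code _
  unfold Spec_hex_hash hex_hash hex_hash_alt
  exact foldl_chars _ _
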